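-- pv_equiv track=rewrite | github.com/PreludeAndFugue/AdventOfCode | 2023/python/day04.py | part2
-- ===== SOURCE A (Python) =====
-- from collections import Counter
--
-- def part2(cards):
--     counter = Counter()
--     for card_no, winning_numbers, numbers in cards:
--         counter[card_no] += 1
--         card_no_count = counter[card_no]
--         n = len(numbers & winning_numbers)
--         if n > 0:
--             for i in range(card_no + 1, card_no + n + 1):
--                 counter[i] += card_no_count
--     return sum(counter.values())
-- ===== SOURCE B (Python) =====
-- def part2(cards):
--     # Backward-gather: each card's copy count comes from scanning the already
--     # processed cards whose match range covers it; the answer is the number of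
--     # original cards plus all copies ever won.
--     done = []   # (card_no, matches, copies) per processed card, in order
--     total = len(cards)
--     for card_no, winning_numbers, numbers in cards:
--         copies = 1 + sum(cj_copies for cj, cj_n, cj_copies in done
--                          if cj < card_no <= cj + cj_n)
--         n = len(set(numbers) & set(winning_numbers))
--         done.append((card_no, n, copies))
--         total += copies * n
--     return total
-- ===== Notes on version B (the rewrite author's own statement) =====
-- stated objective: alternative
-- what changed: B drops the Counter and forward range-propagation entirely: it computes each card's copy count by a backward scan over the already-processed cards whose match range covers it, and totals len(cards) plus all copies won; Pre_ excludes lists with duplicate card numbers, on which A's Counter accumulation across repeated keys is accidental.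
-- outside the precondition, e.g. on part2([(1, {1}, {1}), (1, {1}, {1})]): A returns 5, B returns 4
import Mathlib
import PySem

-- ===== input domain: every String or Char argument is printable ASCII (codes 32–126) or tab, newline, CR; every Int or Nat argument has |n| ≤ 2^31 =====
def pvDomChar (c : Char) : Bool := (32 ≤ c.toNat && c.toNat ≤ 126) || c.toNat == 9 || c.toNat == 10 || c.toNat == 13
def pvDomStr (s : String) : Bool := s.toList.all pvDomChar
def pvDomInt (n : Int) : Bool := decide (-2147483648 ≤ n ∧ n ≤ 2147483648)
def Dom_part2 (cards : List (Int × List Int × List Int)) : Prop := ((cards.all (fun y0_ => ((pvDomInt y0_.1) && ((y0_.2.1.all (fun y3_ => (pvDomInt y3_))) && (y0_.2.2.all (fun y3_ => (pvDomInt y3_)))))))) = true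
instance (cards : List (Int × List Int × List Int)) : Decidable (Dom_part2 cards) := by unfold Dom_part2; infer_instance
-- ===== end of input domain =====

-- B replaces A's Counter + forward range-propagation by a backward gather over the
-- processed prefix, totalling len(cards) plus all copies won (objective: alternative algorithm);
-- lists with duplicate card numbers are excluded by Pre_.

-- ===== PORT A =====
-- len(numbers & winning_numbers): the two set arguments, as lists of their elements
def pvMatches (winning numbers : List Int) : Int :=
  ((PySem.Set.inter (PySem.Set.ofList numbers) (PySem.Set.ofList winning)).length : Int)

def pvAStep (d : PySem.Dict Int Int) (card : Int × List Int × List Int) : PySem.Dict Int Int :=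
  let c := card.1
  let d1 := d.modify c 0 (· + 1)
  let cnt := d1.getD c 0
  let n := pvMatches card.2.1 card.2.2
  if n > 0 then
    (PySem.List.pyRange (c + 1) (c + n + 1) 1).foldl (fun d i => d.modify i 0 (· + cnt)) d1
  else d1

def part2 (cards : List (Int × List Int × List Int)) : Int :=
  ((cards.foldl pvAStep PySem.Dict.empty).values).sum

-- ===== PORT B =====
def pvBStep (st : List (Int × Int × Int) × Int) (card : Int × List Int × List Int) :
    List (Int × Int × Int) × Int :=
  let c := card.1
  let copies := 1 + st.1.foldl
    (fun acc t => if t.1 < c ∧ c ≤ t.1 + t.2.1 then acc + t.2.2 else acc) 0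
  let n := pvMatches card.2.1 card.2.2
  (st.1 ++ [(c, n, copies)], st.2 + copies * n)

def part2_alt (cards : List (Int × List Int × List Int)) : Int :=
  (cards.foldl pvBStep ([], (cards.length : Int))).2

-- ===== PRECONDITION & SPEC =====
-- Pre_ excludes lists with duplicate card numbers, on which A's Counter accumulation
-- across repeated keys is accidental.
def Pre_part2 (cards : List (Int × List Int × List Int)) : Prop :=
  (cards.map (·.1)).Nodup
instance (cards : List (Int × List Int × List Int)) : Decidable (Pre_part2 cards) := by
  unfold Pre_part2; infer_instance

def pvWitness_part2 : (List (Int × List Int × List Int)) :=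
  [(1, [41, 48], [83, 41, 48]), (2, [13], [13]), (3, [], [7])]

def Spec_part2 (cards : List (Int × List Int × List Int)) (out : Int) : Prop := out = part2_alt cards
instance (cards : List (Int × List Int × List Int)) (out : Int) : Decidable (Spec_part2 cards out) := by unfold Spec_part2; infer_instance

-- ===== CLAIM (what is proved, stated in full; the proofs are below) =====
def Claim_equal_part2 : Prop := ∀ (cards : List (Int × List Int × List Int)), Dom_part2 cards → Pre_part2 cards → Spec_part2 cards (part2 cards)

-- ===== LEMMAS AND PROOFS =====

-- contribution of one processed card t to the counter value at a LATER key k (k fresh)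
def pvContrib (t : Int × Int × Int) (k : Int) : Int :=
  if t.1 < k ∧ k ≤ t.1 + t.2.1 then t.2.2 else 0

def pvContribSum (done : List (Int × Int × Int)) (k : Int) : Int :=
  (done.map (fun t => pvContrib t k)).sum

lemma pvMatches_nonneg (w n : List Int) : 0 ≤ pvMatches w n := by
  unfold pvMatches; positivity

-- B's inner foldl computes init + pvContribSum
lemma pv_foldl_cnt (done : List (Int × Int × Int)) (c init : Int) :
    done.foldl
      (fun acc t => if t.1 < c ∧ c ≤ t.1 + t.2.1 then acc + t.2.2 else acc) init
      = init + pvContribSum done c := by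
  induction done generalizing init with
  | nil => simp [pvContribSum]
  | cons t rest ih =>
    simp only [List.foldl_cons, ih, pvContribSum, List.map_cons, List.sum_cons, pvContrib]
    split_ifs <;> ring

-- getD through the inner modify-fold over a Nodup key list
lemma pv_getD_fold (l : List Int) (hl : l.Nodup) (d : PySem.Dict Int Int) (δ k : Int) :
    (l.foldl (fun d i => d.modify i 0 (· + δ)) d).getD k 0
      = d.getD k 0 + (if k ∈ l then δ else 0) := by
  induction l generalizing d with
  | nil => simp
  | cons x rest ih =>
    have hnd := hl
    simp only [List.nodup_cons] at hnd
    simp only [List.foldl_cons, ih hnd.2, PySem.Dict.getD_modify]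
    by_cases hk : k = x
    · subst hk
      simp [hnd.1]
    · simp [hk, List.mem_cons]

-- keys stay Nodup through a modify
lemma pv_nodup_modify (d : PySem.Dict Int Int) (k d0 : Int) (f : Int → Int)
    (h : d.keys.Nodup) : (d.modify k d0 f).keys.Nodup := by
  rw [PySem.Dict.keys_modify]
  exact PySem.Dict.nodup_keys_insert d k _ h

lemma pv_nodup_fold (l : List Int) (d : PySem.Dict Int Int) (δ : Int)
    (h : d.keys.Nodup) :
    (l.foldl (fun d i => d.modify i 0 (· + δ)) d).keys.Nodup := by
  induction l generalizing d with
  | nil => exact h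
  | cons x rest ih => exact ih _ (pv_nodup_modify d x 0 _ h)

-- replacing the unique item with key k changes the value sum by (new − old)
lemma pv_sum_replace (l : List (Int × Int)) (k w x : Int)
    (hnd : (l.map (·.1)).Nodup) (hmem : (k, w) ∈ l) :
    ((l.map (fun p => if p.1 == k then (k, x) else p)).map (·.2)).sum
      = (l.map (·.2)).sum - w + x := by
  induction l with
  | nil => simp at hmem
  | cons p rest ih =>
    simp only [List.map_cons, List.nodup_cons, List.mem_map] at hnd
    rcases List.mem_cons.mp hmem with h | h
    · subst h
      have : ∀ q ∈ rest, (fun p => if p.1 == k then ((k : Int), x) else p) q = q := by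
        intro q hq
        have : q.1 ≠ k := fun hqk => hnd.1 ⟨q, hq, hqk⟩
        simp [this]
      simp only [List.map_cons, BEq.rfl, if_pos, List.map_congr_left this]
      simp; ring
    · have hpk : p.1 ≠ k := by
        intro hpk
        exact hnd.1 ⟨(k, w), h, by simp [hpk]⟩
      simp only [List.map_cons, List.sum_cons, ih hnd.2 h]
      have : (p.1 == k) = false := by simp [hpk]
      simp [this]; ring

-- a modify with f = (· + δ) raises the value sum by exactly δ
lemma pv_sum_modify (d : PySem.Dict Int Int) (k δ : Int) (h : d.keys.Nodup) :
    ((d.modify k 0 (· + δ)).values).sum = d.values.sum + δ := by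
  show ((d.insert k (d.getD k 0 + δ)).values).sum = d.values.sum + δ
  by_cases hc : d.contains k = true
  · have hs : (d.get? k).isSome := by rw [← PySem.Dict.contains_eq_isSome_get?]; exact hc
    obtain ⟨w, hw⟩ := Option.isSome_iff_exists.mp hs
    have hmem : (k, w) ∈ d.items := PySem.Dict.mem_items_of_get?_eq_some d hw
    have hgd : d.getD k 0 = w := PySem.Dict.getD_of_get?_eq_some d 0 hw
    rw [PySem.Dict.values, PySem.Dict.values,
        PySem.Dict.items_insert_of_contains d _ hc,
        pv_sum_replace d.items k w _ h hmem, hgd]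
    ring
  · have hc' : d.contains k = false := by simpa using hc
    rw [PySem.Dict.values, PySem.Dict.values,
        PySem.Dict.items_insert_of_not_contains d _ hc',
        PySem.Dict.getD_of_not_contains d 0 hc']
    simp

lemma pv_sum_fold (l : List Int) (d : PySem.Dict Int Int) (δ : Int)
    (h : d.keys.Nodup) :
    ((l.foldl (fun d i => d.modify i 0 (· + δ)) d).values).sum
      = d.values.sum + δ * l.length := by
  induction l generalizing d with
  | nil => simp
  | cons x rest ih =>
    simp only [List.foldl_cons, ih _ (pv_nodup_modify d x 0 _ h), pv_sum_modify d x δ h,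
      List.length_cons]
    push_cast; ring

-- the main invariant-carrying induction (card numbers in `cards` fresh: not among
-- `done`'s keys and pairwise distinct)
lemma pv_main (cards : List (Int × List Int × List Int))
    (d : PySem.Dict Int Int) (done : List (Int × Int × Int)) (total : Int)
    (hfresh : ∀ k ∈ cards.map (·.1), ∀ t ∈ done, t.1 ≠ k)
    (hnd : (cards.map (·.1)).Nodup)
    (h1 : ∀ k, k ∈ cards.map (·.1) → d.getD k 0 = pvContribSum done k)
    (h2 : d.keys.Nodup)
    (h3 : d.values.sum + (cards.length : Int) = total) :
    ((cards.foldl pvAStep d).values).sum = (cards.foldl pvBStep (done, total)).2 := by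
  induction cards generalizing d done total with
  | nil => simpa using h3
  | cons card rest ih =>
    simp only [List.foldl_cons]
    set c := card.1 with hc
    set n := pvMatches card.2.1 card.2.2 with hn
    have hn0 : 0 ≤ n := pvMatches_nonneg _ _
    have hcmem : c ∈ (card :: rest).map (·.1) := by simp [hc]
    set d1 := d.modify c 0 (· + 1) with hd1
    have hcnt1 : d1.getD c 0 = d.getD c 0 + 1 := by
      rw [hd1, PySem.Dict.getD_modify_self]
    set cnt := d1.getD c 0 with hcntdef
    have hcnt2 : cnt = 1 + pvContribSum done c := by rw [hcnt1, h1 c hcmem]; ring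
    -- B's step
    have hB : pvBStep (done, total) card
        = (done ++ [(c, n, cnt)], total + cnt * n) := by
      simp only [pvBStep, pv_foldl_cnt, zero_add]
      rw [← hcnt2]
    -- A's step
    have hA : pvAStep d card
        = if n > 0 then
            (PySem.List.pyRange (c + 1) (c + n + 1) 1).foldl
              (fun d i => d.modify i 0 (· + cnt)) d1
          else d1 := rfl
    set d' := pvAStep d card with hd'
    -- unified characterisation of d'
    have hget : ∀ k, d'.getD k 0
        = d.getD k 0 + (if c = k then 1 else 0)
          + (if c < k ∧ k ≤ c + n then cnt else 0) := by
      intro k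
      rw [hA]
      by_cases hpos : n > 0
      · rw [if_pos hpos,
          pv_getD_fold _ (PySem.List.nodup_pyRange_one _ _) d1 cnt k, hd1,
          PySem.Dict.getD_modify]
        have hmem : k ∈ PySem.List.pyRange (c + 1) (c + n + 1) 1 ↔ (c < k ∧ k ≤ c + n) := by
          rw [PySem.List.mem_pyRange_one]; omega
        by_cases hk : k = c
        · subst hk
          simp [hmem]
        · have hck : ¬ c = k := fun h => hk h.symm
          by_cases hr : c < k ∧ k ≤ c + n
          · simp [hk, hck, hmem, hr]
          · simp [hk, hck, hmem, hr]
      · have hn0' : n = 0 := by omega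
        rw [if_neg hpos, hd1, PySem.Dict.getD_modify]
        have : ¬ (c < k ∧ k ≤ c + n) := by omega
        by_cases hk : k = c
        · subst hk; simp
        · rw [if_neg hk, if_neg (fun h => hk h.symm), if_neg this]; ring
    have hnd' : d'.keys.Nodup := by
      rw [hA]
      by_cases hpos : n > 0
      · rw [if_pos hpos]; exact pv_nodup_fold _ _ _ (pv_nodup_modify d c 0 _ h2)
      · rw [if_neg hpos]; exact pv_nodup_modify d c 0 _ h2
    have hsum' : d'.values.sum = d.values.sum + 1 + cnt * n := by
      rw [hA]
      by_cases hpos : n > 0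
      · rw [if_pos hpos, pv_sum_fold _ _ _ (pv_nodup_modify d c 0 _ h2),
          pv_sum_modify d c 1 h2, PySem.List.length_pyRange_one]
        have : ((c + n + 1 - (c + 1)).toNat : Int) = n := by omega
        rw [this]
      · have hn0' : n = 0 := by omega
        rw [if_neg hpos, pv_sum_modify d c 1 h2, hn0']; ring
    rw [hB]
    have hrest_sub : ∀ k ∈ rest.map (·.1), k ∈ (card :: rest).map (·.1) := by
      intro k hk; simp [List.mem_cons]; right; simpa using hk
    refine ih d' (done ++ [(c, n, cnt)]) (total + cnt * n) ?_ ?_ ?_ hnd' ?_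
    · intro k hk t ht
      rcases List.mem_append.mp ht with h | h
      · exact hfresh k (hrest_sub k hk) t h
      · simp only [List.mem_singleton] at h
        subst h
        simp only [List.map_cons, List.nodup_cons] at hnd
        intro hek
        have hck : c = k := by simpa using hek
        exact hnd.1 (hc ▸ hck.symm ▸ hk)
    · simp only [List.map_cons, List.nodup_cons] at hnd
      exact hnd.2
    · intro k hk
      have hck : c ≠ k := by
        simp only [List.map_cons, List.nodup_cons] at hnd
        exact fun hek => hnd.1 (hc ▸ hek.symm ▸ hk)
      rw [hget k, h1 k (hrest_sub k hk)]
      simp only [pvContribSum, List.map_append, List.sum_append, List.map_cons,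
        List.map_nil, List.sum_cons, List.sum_nil, pvContrib]
      rw [if_neg hck]
      ring
    · rw [hsum']
      simp only [List.length_cons] at h3
      push_cast at h3 ⊢
      linarith

-- ===== VERDICT (by name: the statement is the Claim_ definition above) =====
theorem part2_spec : Claim_equal_part2 := by
  intro cards _ hpre
  show part2 cards = part2_alt cards
  unfold part2 part2_alt
  exact pv_main cards PySem.Dict.empty [] (cards.length : Int)
    (by intro k _ t ht; simp at ht) hpre
    (by intro k _; simp [pvContribSum]) (by simp) (by simp [PySem.Dict.values, PySem.Dict.empty])
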